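-- pv_equiv track=rewrite | github.com/chubkey3/DMOJ | ccc10j5.py | search
-- ===== SOURCE A (Python) =====
-- import sys, itertools
--
-- def search(current, end, visited, depth=0):
--     a = []
--
--     b = [[1, 2], [2, 1], [2, -1], [1, -2], [-1, -2], [-2, -1], [-2, 1], [-1, 2]]
--
--     if current == end or depth == 6:
--         return [[visited for visited,_ in itertools.groupby(visited)]]
--
--     for x in b:
--         k = current[0]+x[0]
--         l = current[1]+x[1]
--         if 1 <= k <= 8 and 1 <= l <= 8 and [k, l] not in visited:
--             a += search([k, l], end, visited + [current], depth+1)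
--
--     return a
-- ===== SOURCE B (Python) =====
-- def search(current, end, visited, depth=0):
--     # iterative DFS with an explicit stack; moves listed in reverse of the
--     # natural order so LIFO pops expand neighbours in the same order as a
--     # left-to-right recursive scan would
--     rmoves = [(-1, 2), (-2, 1), (-2, -1), (-1, -2), (1, -2), (2, -1), (2, 1), (1, 2)]
--     out = []
--     stack = [(current, visited, depth)]
--     while stack:
--         cur, vis, d = stack.pop()
--         if cur == end or d == 6:
--             path = []
--             for p in vis:
--                 if not path or path[-1] != p:
--                     path.append(p)
--             out.append(path)
--             continue
--         for dx, dy in rmoves: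
--             k = cur[0] + dx
--             l = cur[1] + dy
--             if 1 <= k <= 8 and 1 <= l <= 8 and [k, l] not in vis:
--                 stack.append(([k, l], vis + [cur], d + 1))
--     return out
-- ===== Notes on version B (the rewrite author's own statement) =====
-- stated objective: alternative
-- what changed: The recursive DFS with an accumulating for-loop is replaced by an iterative loop over an explicit stack of (position, visited, depth) frames (neighbors pushed in a pre-reversed move order so pops match A's scan order), and the itertools.groupby path dedup is replaced by a single last-element-comparison scan.
import Mathlib
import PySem

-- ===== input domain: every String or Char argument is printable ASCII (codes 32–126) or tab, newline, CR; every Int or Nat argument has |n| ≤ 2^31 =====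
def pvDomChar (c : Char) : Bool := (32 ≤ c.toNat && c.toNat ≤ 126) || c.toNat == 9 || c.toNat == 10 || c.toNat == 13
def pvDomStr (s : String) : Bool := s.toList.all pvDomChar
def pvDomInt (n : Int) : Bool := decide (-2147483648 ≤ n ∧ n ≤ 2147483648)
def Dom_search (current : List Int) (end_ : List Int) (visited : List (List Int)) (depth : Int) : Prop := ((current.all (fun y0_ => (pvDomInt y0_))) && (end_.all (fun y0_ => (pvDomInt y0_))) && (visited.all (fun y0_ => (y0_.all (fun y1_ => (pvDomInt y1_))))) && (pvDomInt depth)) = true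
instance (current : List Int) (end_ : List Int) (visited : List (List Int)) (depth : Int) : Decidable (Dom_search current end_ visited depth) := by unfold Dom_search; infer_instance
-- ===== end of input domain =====

-- B replaces A's recursive DFS by an iterative explicit-stack loop (same output, same order;
-- moves pushed in pre-reversed order) and the groupby path-dedup by a last-element scan.

-- ===== PORT A =====
-- the knight-move offsets (Python's local `b` in A)
def bmoves : List (List Int) := [[1, 2], [2, 1], [2, -1], [1, -2], [-1, -2], [-2, -1], [-2, 1], [-1, 2]]

-- [visited for visited,_ in itertools.groupby(visited)] : the keys of consecutive groups
def groupKeys : List (List Int) → List (List Int)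
  | [] => []
  | x :: xs => x :: groupKeys (xs.dropWhile (fun y => y == x))
termination_by l => l.length
decreasing_by simpa [Nat.lt_succ_iff] using List.length_dropWhile_le (fun y => y == x) xs

-- ── termination measure for A's DFS (not part of the Python; used only by decreasing_by) ──
def boardCells : List (List Int) :=
  (List.range 8).flatMap (fun i => (List.range 8).map (fun j => [((i : Int) + 1), ((j : Int) + 1)]))

def nuCells (w : List (List Int)) : Nat := boardCells.countP (fun c => decide (c ∉ w))

def muCells (c : List Int) (v : List (List Int)) : Nat :=
  2 * nuCells (v ++ [c]) + (if c ∈ v then 0 else 1)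

lemma mem_boardCells (k l : Int) (hk1 : 1 ≤ k) (hk8 : k ≤ 8) (hl1 : 1 ≤ l) (hl8 : l ≤ 8) :
    [k, l] ∈ boardCells := by
  interval_cases k <;> interval_cases l <;> decide

lemma countP_strict_lt {α : Type} (l : List α) (p q : α → Bool)
    (hpq : ∀ a, p a = true → q a = true) (z : α) (hz : z ∈ l)
    (hq : q z = true) (hp : p z = false) :
    l.countP p < l.countP q := by
  induction l with
  | nil => simp at hz
  | cons a t ih =>
    have hmono : t.countP p ≤ t.countP q :=
      List.countP_mono_left (l := t) (fun x _ hx => hpq x hx)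
    rcases List.mem_cons.mp hz with rfl | hzt
    · simp [hq, hp]; omega
    · have := ih hzt
      by_cases hpa : p a = true
      · simp [hpa, hpq a hpa]; omega
      · simp only [Bool.not_eq_true] at hpa
        by_cases hqa : q a = true
        · simp [hpa, hqa]; omega
        · simp only [Bool.not_eq_true] at hqa
          simp [hpa, hqa]; omega

lemma nuCells_append_lt {z : List Int} {w : List (List Int)} (hz : z ∈ boardCells)
    (hnw : z ∉ w) : nuCells (w ++ [z]) < nuCells w := by
  refine countP_strict_lt boardCells _ _ ?_ z hz (by simpa) (by simp)
  intro a ha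
  simp only [decide_eq_true_eq, List.mem_append, List.mem_singleton] at ha ⊢
  exact fun h => ha (Or.inl h)

lemma nuCells_append_eq {z : List Int} {w : List (List Int)} (hz : z ∈ w) :
    nuCells (w ++ [z]) = nuCells w := by
  unfold nuCells
  apply List.countP_congr
  intro c _
  simp only [decide_eq_true_eq, List.mem_append, List.mem_singleton]
  constructor
  · exact fun h hc => h (Or.inl hc)
  · rintro h (hc | rfl)
    · exact h hc
    · exact h hz

lemma muCells_lt (k l : Int) (cur : List Int) (vis : List (List Int))
    (hk1 : 1 ≤ k) (hk8 : k ≤ 8) (hl1 : 1 ≤ l) (hl8 : l ≤ 8) (hnin : [k, l] ∉ vis) :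
    muCells [k, l] (vis ++ [cur]) < muCells cur vis := by
  have hzb : [k, l] ∈ boardCells := mem_boardCells k l hk1 hk8 hl1 hl8
  by_cases hc : [k, l] = cur
  · subst hc
    have hm : [k, l] ∈ vis ++ [[k, l]] := by simp
    have h1 : muCells [k, l] (vis ++ [[k, l]]) = 2 * nuCells (vis ++ [[k, l]]) := by
      unfold muCells
      rw [if_pos hm, nuCells_append_eq hm]
      omega
    have h2 : muCells [k, l] vis = 2 * nuCells (vis ++ [[k, l]]) + 1 := by
      unfold muCells
      rw [if_neg hnin]
    omega
  · have hzw : [k, l] ∉ vis ++ [cur] := by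
      simp only [List.mem_append, List.mem_singleton]
      rintro (h | h) <;> [exact hnin h; exact hc h]
    have hlt : nuCells ((vis ++ [cur]) ++ [[k, l]]) < nuCells (vis ++ [cur]) :=
      nuCells_append_lt hzb hzw
    unfold muCells
    rw [if_neg hzw]
    by_cases h : cur ∈ vis
    · rw [if_pos h]; omega
    · rw [if_neg h]; omega

-- A's recursive DFS; the for-loop over the 8 moves is the structural recursion goA over `b`,
-- accumulating `a`.  current[0] / current[1] via pyGetD (in range under Pre_search).
mutual
def search (current : List Int) (end_ : List Int) (visited : List (List Int)) (depth : Int) :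
    List (List (List Int)) :=
  if current = end_ ∨ depth = 6 then [groupKeys visited]
  else goA bmoves current end_ visited depth []
termination_by (muCells current visited, 9)
decreasing_by
  exact Prod.Lex.right _ (by simp [bmoves])

def goA (ms : List (List Int)) (current : List Int) (end_ : List Int)
    (visited : List (List Int)) (depth : Int) (a : List (List (List Int))) :
    List (List (List Int)) :=
  match ms with
  | [] => a
  | x :: xs =>
    let k := PySem.List.pyGetD current 0 0 + PySem.List.pyGetD x 0 0
    let l := PySem.List.pyGetD current 1 0 + PySem.List.pyGetD x 1 0
    if h : 1 ≤ k ∧ k ≤ 8 ∧ 1 ≤ l ∧ l ≤ 8 ∧ [k, l] ∉ visited then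
      goA xs current end_ visited depth
        (a ++ search [k, l] end_ (visited ++ [current]) (depth + 1))
    else goA xs current end_ visited depth a
termination_by (muCells current visited, ms.length)
decreasing_by
· apply Prod.Lex.left
  exact muCells_lt _ _ _ _ h.1 h.2.1 h.2.2.1 h.2.2.2.1 h.2.2.2.2
· apply Prod.Lex.right
  simp
· apply Prod.Lex.right
  simp
end

-- ===== PORT B =====
-- B's iterative DFS: a while-loop popping (position, path-so-far, level) frames from an
-- explicit stack, with the moves written out in pre-reversed order (Python's `rmoves`).

def rmoves : List (Int × Int) :=
  [(-1, 2), (-2, 1), (-2, -1), (-1, -2), (1, -2), (2, -1), (2, 1), (1, 2)]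

-- B's inner for-loop body: conditionally push one successor frame onto the stack
def stepB (cur : List Int) (vis : List (List Int)) (d : Int)
    (st : List (List Int × List (List Int) × Int)) (m : Int × Int) :
    List (List Int × List (List Int) × Int) :=
  let k := PySem.List.pyGetD cur 0 0 + m.1
  let l := PySem.List.pyGetD cur 1 0 + m.2
  if 1 ≤ k ∧ k ≤ 8 ∧ 1 ≤ l ∧ l ≤ 8 ∧ [k, l] ∉ vis then ([k, l], vis ++ [cur], d + 1) :: st
  else st

-- B's path dedup: `if not path or path[-1] != p: path.append(p)`
def dedupLoop (vis : List (List Int)) : List (List Int) :=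
  vis.foldl (fun path p => if path = [] ∨ path.getLast? ≠ some p then path ++ [p] else path) []

-- B's while-loop; the Nat argument is fuel making the recursion structural — it is never
-- exhausted at the fuel search_alt supplies (lemma loopB_spec / fuel_sufficient below)
def loopB : Nat → List (List Int × List (List Int) × Int) → List Int →
    List (List (List Int)) → List (List (List Int))
  | _, [], _, out => out
  | 0, _ :: _, _, out => out
  | fuel + 1, (cur, vis, d) :: rest, e, out =>
    if cur = e ∨ d = 6 then loopB fuel rest e (out ++ [dedupLoop vis])
    else loopB fuel (rmoves.foldl (stepB cur vis d) rest) e out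

def search_alt (current : List Int) (end_ : List Int) (visited : List (List Int)) (depth : Int) :
    List (List (List Int)) :=
  loopB (9 ^ 130) [(current, visited, depth)] end_ []

-- ===== PRECONDITION & SPEC =====
-- Pre_search excludes exactly the inputs where Python A raises IndexError: current shorter than
-- 2 is indexed by current[0]/current[1] unless the leaf test (current == end or depth == 6) fires.
def Pre_search (current : List Int) (end_ : List Int) (visited : List (List Int)) (depth : Int) : Prop :=
  current = end_ ∨ depth = 6 ∨ 2 ≤ current.length
instance (current : List Int) (end_ : List Int) (visited : List (List Int)) (depth : Int) :
    Decidable (Pre_search current end_ visited depth) := by unfold Pre_search; infer_instance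

def pvWitness_search : List Int × List Int × List (List Int) × Int := ([1, 1], [2, 3], [], 4)

def Spec_search (current : List Int) (end_ : List Int) (visited : List (List Int)) (depth : Int)
    (out : List (List (List Int))) : Prop := out = search_alt current end_ visited depth
instance (current : List Int) (end_ : List Int) (visited : List (List Int)) (depth : Int)
    (out : List (List (List Int))) : Decidable (Spec_search current end_ visited depth out) := by
  unfold Spec_search; infer_instance

-- ===== CLAIM =====
def Claim_equal_search : Prop := ∀ (current : List Int) (end_ : List Int)
    (visited : List (List Int)) (depth : Int), Dom_search current end_ visited depth →
    Pre_search current end_ visited depth →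
    Spec_search current end_ visited depth (search current end_ visited depth)

-- ===== LEMMAS AND PROOFS =====

-- B's last-element scan computes A's groupby keys
lemma dedupLoop_step (l : List (List Int)) : ∀ (pre : List (List Int)) (x : List Int),
    l.foldl (fun path p => if path = [] ∨ path.getLast? ≠ some p then path ++ [p] else path)
        (pre ++ [x]) =
      pre ++ [x] ++ groupKeys (l.dropWhile (fun y => y == x)) := by
  induction l with
  | nil => simp [groupKeys]
  | cons p rest ih =>
    intro pre x
    by_cases hpx : p = x
    · subst hpx
      simp [ih]
    · have hne : ¬ (p == x) = true := by simpa using hpx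
      simp only [List.foldl_cons, List.dropWhile_cons, hne]
      rw [if_pos (by simp; exact fun h => hpx h.symm)]
      rw [List.append_assoc pre [x] [p]]
      rw [show pre ++ ([x] ++ [p]) = (pre ++ [x]) ++ [p] by simp]
      rw [ih (pre ++ [x]) p]
      simp [groupKeys]

lemma dedupLoop_eq_groupKeys (vis : List (List Int)) : dedupLoop vis = groupKeys vis := by
  cases vis with
  | nil => simp [dedupLoop, groupKeys]
  | cons x xs =>
    unfold dedupLoop
    simp only [List.foldl_cons]
    have := dedupLoop_step xs [] x
    simpa [groupKeys] using this

-- the successor frame produced by one move (as a list, A's view)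
def childA (cur : List Int) (vis : List (List Int)) (d : Int) (m : List Int) :
    Option (List Int × List (List Int) × Int) :=
  if 1 ≤ PySem.List.pyGetD cur 0 0 + PySem.List.pyGetD m 0 0 ∧
      PySem.List.pyGetD cur 0 0 + PySem.List.pyGetD m 0 0 ≤ 8 ∧
      1 ≤ PySem.List.pyGetD cur 1 0 + PySem.List.pyGetD m 1 0 ∧
      PySem.List.pyGetD cur 1 0 + PySem.List.pyGetD m 1 0 ≤ 8 ∧
      [PySem.List.pyGetD cur 0 0 + PySem.List.pyGetD m 0 0,
       PySem.List.pyGetD cur 1 0 + PySem.List.pyGetD m 1 0] ∉ vis then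
    some ([PySem.List.pyGetD cur 0 0 + PySem.List.pyGetD m 0 0,
           PySem.List.pyGetD cur 1 0 + PySem.List.pyGetD m 1 0], vis ++ [cur], d + 1)
  else none

-- the same frame from a move given as a pair (B's view)
def childB (cur : List Int) (vis : List (List Int)) (d : Int) (m : Int × Int) :
    Option (List Int × List (List Int) × Int) :=
  if 1 ≤ PySem.List.pyGetD cur 0 0 + m.1 ∧ PySem.List.pyGetD cur 0 0 + m.1 ≤ 8 ∧
      1 ≤ PySem.List.pyGetD cur 1 0 + m.2 ∧ PySem.List.pyGetD cur 1 0 + m.2 ≤ 8 ∧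
      [PySem.List.pyGetD cur 0 0 + m.1, PySem.List.pyGetD cur 1 0 + m.2] ∉ vis then
    some ([PySem.List.pyGetD cur 0 0 + m.1, PySem.List.pyGetD cur 1 0 + m.2], vis ++ [cur], d + 1)
  else none

lemma childA_pair (cur : List Int) (vis : List (List Int)) (d : Int) (p q : Int) :
    childA cur vis d [p, q] = childB cur vis d (p, q) := by
  simp [childA, childB, PySem.List.pyGetD, PySem.List.pyGet?, PySem.List.pyIdx?]

lemma foldl_stepB (cur : List Int) (vis : List (List Int)) (d : Int) :
    ∀ (L : List (Int × Int)) (init : List (List Int × List (List Int) × Int)),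
      L.foldl (stepB cur vis d) init = (L.filterMap (childB cur vis d)).reverse ++ init := by
  intro L
  induction L with
  | nil => simp
  | cons x xs ih =>
    intro init
    simp only [List.foldl_cons, List.filterMap_cons]
    by_cases h : 1 ≤ PySem.List.pyGetD cur 0 0 + x.1 ∧ PySem.List.pyGetD cur 0 0 + x.1 ≤ 8 ∧
        1 ≤ PySem.List.pyGetD cur 1 0 + x.2 ∧ PySem.List.pyGetD cur 1 0 + x.2 ≤ 8 ∧
        [PySem.List.pyGetD cur 0 0 + x.1, PySem.List.pyGetD cur 1 0 + x.2] ∉ vis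
    · simp [stepB, childB, h, ih]
    · simp [stepB, childB, h, ih]

-- the pre-reversed pair list enumerates exactly the successors A's loop over `b` finds, reversed
lemma moves_bridge (cur : List Int) (vis : List (List Int)) (d : Int) :
    (rmoves.filterMap (childB cur vis d)).reverse = bmoves.filterMap (childA cur vis d) := by
  have h : ∀ p q, childA cur vis d [p, q] = childB cur vis d (p, q) := childA_pair cur vis d
  simp only [bmoves, rmoves, List.filterMap_cons, List.filterMap_nil, h]
  cases h1 : childB cur vis d (1, 2) <;> cases h2 : childB cur vis d (2, 1) <;>
    cases h3 : childB cur vis d (2, -1) <;> cases h4 : childB cur vis d (1, -2) <;>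
    cases h5 : childB cur vis d (-1, -2) <;> cases h6 : childB cur vis d (-2, -1) <;>
    cases h7 : childB cur vis d (-2, 1) <;> cases h8 : childB cur vis d (-1, 2) <;> simp

lemma childB_mu_lt (cur : List Int) (vis : List (List Int)) (d : Int) (m : Int × Int)
    (fr : List Int × List (List Int) × Int) (hfr : childB cur vis d m = some fr) :
    muCells fr.1 fr.2.1 < muCells cur vis := by
  unfold childB at hfr
  split at hfr
  · rename_i h
    cases hfr
    exact muCells_lt _ _ _ _ h.1 h.2.1 h.2.2.1 h.2.2.2.1 h.2.2.2.2
  · cases hfr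

-- A's move loop produces exactly the concatenation of the children's searches
lemma goA_spec (e : List Int) : ∀ (ms : List (List Int)) (cur : List Int)
    (vis : List (List Int)) (d : Int) (a : List (List (List Int))),
    goA ms cur e vis d a =
      a ++ (ms.filterMap (childA cur vis d)).flatMap (fun fr => search fr.1 e fr.2.1 fr.2.2) := by
  intro ms
  induction ms with
  | nil => intro cur vis d a; rw [goA.eq_def]; simp
  | cons x xs ih =>
    intro cur vis d a
    rw [goA.eq_def]
    simp only [List.filterMap_cons]
    by_cases h : 1 ≤ PySem.List.pyGetD cur 0 0 + PySem.List.pyGetD x 0 0 ∧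
        PySem.List.pyGetD cur 0 0 + PySem.List.pyGetD x 0 0 ≤ 8 ∧
        1 ≤ PySem.List.pyGetD cur 1 0 + PySem.List.pyGetD x 1 0 ∧
        PySem.List.pyGetD cur 1 0 + PySem.List.pyGetD x 1 0 ≤ 8 ∧
        [PySem.List.pyGetD cur 0 0 + PySem.List.pyGetD x 0 0,
         PySem.List.pyGetD cur 1 0 + PySem.List.pyGetD x 1 0] ∉ vis
    · simp only [dif_pos h, childA, if_pos h, ih]
      simp
    · simp only [dif_neg h, childA, if_neg h, ih]

-- the potential dominating the number of steps B's loop still takes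
def phiStack (st : List (List Int × List (List Int) × Int)) : Nat :=
  (st.map (fun fr => 9 ^ (muCells fr.1 fr.2.1 + 1))).sum

lemma phi_children_lt (cur : List Int) (vis : List (List Int)) (d : Int) :
    phiStack (rmoves.filterMap (childB cur vis d)) < 9 ^ (muCells cur vis + 1) := by
  unfold phiStack
  have hb : ∀ x ∈ (rmoves.filterMap (childB cur vis d)).map
      (fun fr => 9 ^ (muCells fr.1 fr.2.1 + 1)), x ≤ 9 ^ muCells cur vis := by
    intro x hx
    simp only [List.mem_map, List.mem_filterMap] at hx
    obtain ⟨fr, ⟨m, _, hm⟩, rfl⟩ := hx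
    exact Nat.pow_le_pow_right (by omega) (childB_mu_lt cur vis d m fr hm)
  have hsum := List.sum_le_card_nsmul _ _ hb
  have hlen : ((rmoves.filterMap (childB cur vis d)).map
      (fun fr => 9 ^ (muCells fr.1 fr.2.1 + 1))).length ≤ 8 := by
    simpa [rmoves] using List.length_filterMap_le (childB cur vis d) rmoves
  have hpos : 0 < 9 ^ muCells cur vis := pow_pos (by omega) _
  have h9 : 9 ^ (muCells cur vis + 1) = 9 * 9 ^ muCells cur vis := by ring
  simp only [smul_eq_mul] at hsum
  nlinarith [hsum, hlen, hpos]

-- with enough fuel, the stack loop flattens A's per-frame results, in order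
lemma loopB_spec : ∀ (n : Nat) (stack : List (List Int × List (List Int) × Int)) (e : List Int)
    (out : List (List (List Int))), phiStack stack ≤ n →
    loopB n stack e out = out ++ stack.flatMap (fun fr => search fr.1 e fr.2.1 fr.2.2) := by
  intro n
  induction n with
  | zero =>
    intro stack e out hphi
    cases stack with
    | nil => simp [loopB]
    | cons fr rest =>
      exfalso
      have : 0 < 9 ^ (muCells fr.1 fr.2.1 + 1) := pow_pos (by omega) _
      simp only [phiStack, List.map_cons, List.sum_cons, Nat.le_zero] at hphi
      omega
  | succ n ih =>
    intro stack e out hphi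
    cases stack with
    | nil => simp [loopB]
    | cons fr rest =>
      obtain ⟨cur, vis, d⟩ := fr
      have hpos : 0 < 9 ^ (muCells cur vis + 1) := pow_pos (by omega) _
      have hsplit : phiStack ((cur, vis, d) :: rest) =
          9 ^ (muCells cur vis + 1) + phiStack rest := by
        simp [phiStack]
      by_cases hleaf : cur = e ∨ d = 6
      · rw [loopB, if_pos hleaf, ih rest e _ (by omega)]
        have hs : search cur e vis d = [groupKeys vis] := by
          rw [search.eq_def, if_pos hleaf]
        simp only [List.flatMap_cons]
        rw [hs, dedupLoop_eq_groupKeys]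
        simp
      · rw [loopB, if_neg hleaf, foldl_stepB]
        have hlt := phi_children_lt cur vis d
        have hphi2 : phiStack ((rmoves.filterMap (childB cur vis d)).reverse ++ rest) ≤ n := by
          have : phiStack ((rmoves.filterMap (childB cur vis d)).reverse) =
              phiStack (rmoves.filterMap (childB cur vis d)) := by
            simp [phiStack, List.sum_reverse]
          simp only [phiStack, List.map_append, List.sum_append] at *
          omega
        rw [ih _ e out hphi2]
        have hs : search cur e vis d =
            List.flatMap (fun fr => search fr.1 e fr.2.1 fr.2.2)
              (bmoves.filterMap (childA cur vis d)) := by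
          rw [search.eq_def, if_neg hleaf, goA_spec]
          simp
        simp only [List.flatMap_cons, List.flatMap_append]
        rw [hs, ← moves_bridge]

-- the fuel search_alt supplies always suffices for the initial one-frame stack
lemma fuel_sufficient (current : List Int) (visited : List (List Int)) (depth : Int) :
    phiStack [(current, visited, depth)] ≤ 9 ^ 130 := by
  have hnu : nuCells (visited ++ [current]) ≤ 64 := by
    have := List.countP_le_length (l := boardCells)
      (p := fun c => decide (c ∉ visited ++ [current]))
    simpa [nuCells, boardCells] using this
  have hmu : muCells current visited + 1 ≤ 130 := by
    unfold muCells
    split <;> omega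
  calc phiStack [(current, visited, depth)] = 9 ^ (muCells current visited + 1) := by
        simp [phiStack]
    _ ≤ 9 ^ 130 := Nat.pow_le_pow_right (by omega) hmu

-- ===== VERDICT =====
theorem search_spec : Claim_equal_search := by
  intro current end_ visited depth _ _
  unfold Spec_search search_alt
  rw [loopB_spec _ _ _ _ (fuel_sufficient current visited depth)]
  simp
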